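-- pv_equiv track=rewrite | github.com/wspace/cybis-hapyli | assembler.py | numberToWhitespace
-- ===== SOURCE A (Python) =====
-- s = ' '
--
-- t = '\t'
--
-- def numberToWhitespace(value):
--
--     if value < 0:
--         sign = 1
--     else:
--         sign = 0
--
--     value = abs(value)
--
--     if value == 0:
--         revbits = [0]
--     else:
--         revbits = []
--         while value != 0:
--             bit = value & 0x01
--             revbits.append(bit)
--             value = value >> 1
--
--     revbits.append(sign)
--
--     bits = reversed(revbits)
--     binstr = ''.join(map(str, bits))
--
--     wsstr = binstr.replace('0', s).replace('1', t)
--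
--     return wsstr
-- ===== SOURCE B (Python) =====
-- def numberToWhitespace(value):
--     sign = '1' if value < 0 else '0'
--     magnitude = '0' if value == 0 else bin(abs(value))[2:]
--     return (sign + magnitude).replace('0', ' ').replace('1', '\t')
-- ===== Notes on version B (the rewrite author's own statement) =====
-- stated objective: idiomatic
-- what changed: Replaces the manual bit-extraction while-loop with reversed-list building and per-bit str() joining by the built-in bin() conversion plus a single string concatenation, with the zero case handled by one guard.
import Mathlib
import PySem

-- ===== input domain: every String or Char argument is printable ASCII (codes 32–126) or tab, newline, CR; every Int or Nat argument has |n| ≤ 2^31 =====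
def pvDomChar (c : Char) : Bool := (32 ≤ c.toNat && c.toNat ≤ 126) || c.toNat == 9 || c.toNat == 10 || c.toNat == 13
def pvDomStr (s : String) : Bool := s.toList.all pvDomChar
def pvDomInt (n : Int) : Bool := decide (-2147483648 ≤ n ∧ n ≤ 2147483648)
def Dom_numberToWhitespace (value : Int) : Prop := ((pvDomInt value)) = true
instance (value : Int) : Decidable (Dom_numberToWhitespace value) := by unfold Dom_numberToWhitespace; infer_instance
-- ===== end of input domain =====

-- B replaces A's manual bit-extraction while-loop (reversed bit list + per-bit str() join) by the
-- built-in binary conversion bin(abs(value))[2:] plus one concatenation (objective: idiomatic).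

-- ===== PORT A =====
-- A's while-loop: `while value != 0: bit = value & 1; revbits.append(bit); value >>= 1`.
-- The `v ≤ 0` guard only makes the recursion total; A always enters the loop with v = abs(value) ≥ 0.
def pvBitLoop (v : Int) (acc : List Int) : List Int :=
  if _h : v ≤ 0 then acc
  else pvBitLoop (v >>> (1 : Nat)) (acc ++ [PySem.Int.band v 1])
termination_by v.toNat
decreasing_by
  have h2 : v >>> (1 : Nat) = v / 2 := by rw [Int.shiftRight_eq_div_pow]; norm_num
  rw [h2]; omega

def numberToWhitespace (value : Int) : String :=
  let sign : Int := if value < 0 then 1 else 0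
  let v : Int := |value|
  let revbits : List Int := if v = 0 then [0] else pvBitLoop v []
  let revbits2 : List Int := revbits ++ [sign]
  let bits : List Int := revbits2.reverse
  let binstr : String := PySem.Str.join "" (bits.map PySem.Int.toStr)
  PySem.Str.replace (PySem.Str.replace binstr "0" " ") "1" "\t"

-- ===== PORT B =====
def numberToWhitespace_alt (value : Int) : String :=
  let sign : String := if value < 0 then "1" else "0"
  let magnitude : String :=
    if value = 0 then "0" else PySem.Str.slice (PySem.Int.pyBin |value|) (some 2) none
  PySem.Str.replace
    (PySem.Str.replace (String.ofList (sign.toList ++ magnitude.toList)) "0" " ") "1" "\t"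

-- ===== PRECONDITION & SPEC =====
def Spec_numberToWhitespace (value : Int) (out : String) : Prop := out = numberToWhitespace_alt value
instance (value : Int) (out : String) : Decidable (Spec_numberToWhitespace value out) := by unfold Spec_numberToWhitespace; infer_instance

-- ===== CLAIM (what is proved, stated in full; the proofs are below) =====
def Claim_equal_numberToWhitespace : Prop := ∀ (value : Int), Dom_numberToWhitespace value → Spec_numberToWhitespace value (numberToWhitespace value)

-- ===== LEMMAS AND PROOFS =====

-- little-endian binary digits of n (empty for 0); the common description of both programs
def pvBitsLE (n : Nat) : List Char :=
  if h : n = 0 then [] else Nat.digitChar (n % 2) :: pvBitsLE (n / 2)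
termination_by n
decreasing_by exact Nat.div_lt_self (Nat.pos_of_ne_zero h) (by norm_num)

def pvChInt (c : Char) : Int := if c = '1' then 1 else 0

theorem pvBitsLE_mem (n : Nat) : ∀ c ∈ pvBitsLE n, c = '0' ∨ c = '1' := by
  induction n using Nat.strong_induction_on with
  | _ n ih =>
    intro c hc
    rw [pvBitsLE] at hc
    by_cases h : n = 0
    · simp [h] at hc
    · rw [dif_neg h] at hc
      rcases List.mem_cons.mp hc with hc | hc
      · have h2 : n % 2 = 0 ∨ n % 2 = 1 := by omega
        rcases h2 with h2 | h2 <;> simp [hc, h2, Nat.digitChar]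
      · exact ih (n / 2) (Nat.div_lt_self (Nat.pos_of_ne_zero h) (by norm_num)) c hc

theorem pvBitLoop_spec (n : Nat) : ∀ acc : List Int,
    pvBitLoop (n : Int) acc = acc ++ (pvBitsLE n).map pvChInt := by
  induction n using Nat.strong_induction_on with
  | _ n ih =>
    intro acc
    rw [pvBitLoop, pvBitsLE]
    by_cases h : n = 0
    · simp [h]
    · have hpos : ¬ ((n : Int) ≤ 0) := by
        simp only [not_le]; exact_mod_cast Nat.pos_of_ne_zero h
      have hshift : ((n : Int) >>> (1 : Nat)) = ((n / 2 : Nat) : Int) := by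
        rw [Int.shiftRight_eq_div_pow]
        have h2 : ((((2 : Nat) ^ (1 : Nat) : Nat)) : Int) = 2 := by norm_num
        rw [h2]
        omega
      have hband : PySem.Int.band (n : Int) 1 = ((n % 2 : Nat) : Int) := by
        have := PySem.Int.band_natCast n 1
        simpa [Nat.and_one_is_mod] using this
      simp only [h, hpos, dite_false, hshift, hband]
      rw [ih (n / 2) (Nat.div_lt_self (Nat.pos_of_ne_zero h) (by norm_num))]
      have hch : pvChInt (Nat.digitChar (n % 2)) = ((n % 2 : Nat) : Int) := by
        have h2 : n % 2 = 0 ∨ n % 2 = 1 := by omega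
        rcases h2 with h2 | h2 <;> simp [h2, Nat.digitChar, pvChInt]
      simp [hch]

theorem pvToDigitsCore_spec (fuel : Nat) : ∀ (n : Nat) (acc : List Char), n ≤ fuel → n ≠ 0 →
    Nat.toDigitsCore 2 fuel n acc = (pvBitsLE n).reverse ++ acc := by
  induction fuel with
  | zero => intro n acc hle h0; omega
  | succ f ihf =>
    intro n acc hle h0
    rw [Nat.toDigitsCore, pvBitsLE]
    simp only [h0, dite_false]
    by_cases h2 : n / 2 = 0
    · rw [pvBitsLE]
      simp [h2]
    · have hlt : n / 2 ≤ f := by omega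
      rw [if_neg h2, ihf (n / 2) _ hlt h2]
      simp

theorem pvToDigits_spec (n : Nat) (h0 : n ≠ 0) : Nat.toDigits 2 n = (pvBitsLE n).reverse := by
  rw [Nat.toDigits, pvToDigitsCore_spec (n + 1) n [] (by omega) h0]
  simp

def pvChC (b : Int) : Char := if b = 1 then '1' else '0'

theorem pvChC_pvChInt (c : Char) (h : c = '0' ∨ c = '1') : pvChC (pvChInt c) = c := by
  rcases h with h | h <;> subst h <;> decide

-- A's binary string, on the char-list level, equals B's sign ++ magnitude
theorem pv_chars_eq (value : Int) :
    (PySem.Str.join ""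
        ((((if |value| = 0 then [(0 : Int)] else pvBitLoop |value| []) ++
            [if value < 0 then (1 : Int) else 0]).reverse).map PySem.Int.toStr)).toList =
      ((if value < 0 then "1" else "0") : String).toList ++
        ((if value = 0 then "0"
          else PySem.Str.slice (PySem.Int.pyBin |value|) (some 2) none) : String).toList := by
  by_cases hz : value = 0
  · subst hz; decide
  · have hvne : ¬ (|value| = 0) := by simpa [abs_eq_zero] using hz
    have habs : |value| = ((value.natAbs : Nat) : Int) := Int.abs_eq_natAbs value
    have hn0 : value.natAbs ≠ 0 := by simpa [Int.natAbs_eq_zero] using hz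
    rw [if_neg hvne, if_neg hz, habs, pvBitLoop_spec value.natAbs []]
    rw [PySem.Str.toList_join, List.map_map]
    have hmem : ∀ b ∈ (([] ++ (pvBitsLE value.natAbs).map pvChInt) ++
        [if value < 0 then (1 : Int) else 0]).reverse, b = 0 ∨ b = 1 := by
      intro b hb
      rw [List.mem_reverse, List.mem_append] at hb
      rcases hb with hb | hb
      · rw [List.nil_append, List.mem_map] at hb
        obtain ⟨c, _, hc⟩ := hb
        unfold pvChInt at hc
        split at hc <;> omega
      · rw [List.mem_singleton] at hb
        subst hb
        split <;> simp
    have h1 : (((([] ++ (pvBitsLE value.natAbs).map pvChInt) ++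
          [if value < 0 then (1 : Int) else 0]).reverse).map
            (String.toList ∘ PySem.Int.toStr)) =
        ((((([] ++ (pvBitsLE value.natAbs).map pvChInt) ++
          [if value < 0 then (1 : Int) else 0]).reverse).map pvChC).map (fun c => [c])) := by
      rw [List.map_map]
      refine List.map_congr_left (fun b hb => ?_)
      rcases hmem b hb with h | h <;> subst h <;> decide
    rw [h1]
    have hsep : ("" : String).toList = ([] : List Char) := by decide
    rw [hsep, PySem.Chars.join_nil_singletons]
    have h2 : (pvBitsLE value.natAbs).map (pvChC ∘ pvChInt) = pvBitsLE value.natAbs := by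
      have h3 := List.map_congr_left
        (l := pvBitsLE value.natAbs) (f := pvChC ∘ pvChInt) (g := id)
        (fun c hc => by
          have hm := pvBitsLE_mem value.natAbs c hc
          simpa using pvChC_pvChInt c hm)
      simpa using h3
    have hmag : (PySem.Str.slice (PySem.Int.pyBin ((value.natAbs : Nat) : Int)) (some 2) none).toList =
        (pvBitsLE value.natAbs).reverse := by
      rw [PySem.Str.toList_slice, PySem.Chars.slice_eq_listSlice]
      rw [PySem.List.slice_from _ (by norm_num : (0 : Int) ≤ 2)]
      have hb : (PySem.Int.pyBin ((value.natAbs : Nat) : Int)).toList =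
          '0' :: 'b' :: Nat.toDigits 2 value.natAbs := by
        unfold PySem.Int.pyBin PySem.Int.toBinChars0b
        rw [String.toList_ofList]
        have hnn : ¬ (((value.natAbs : Nat) : Int) < 0) := by omega
        rw [if_neg hnn, Int.toNat_natCast]
      rw [hb, pvToDigits_spec value.natAbs hn0]
      rfl
    simp only [List.nil_append, List.reverse_append, List.reverse_singleton,
      List.singleton_append, List.map_cons, List.map_reverse, List.map_map]
    rw [h2, hmag]
    by_cases hneg : value < 0
    · rw [if_pos hneg, if_pos hneg, show ("1" : String).toList = ['1'] from by decide]
      simp [pvChC]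
    · rw [if_neg hneg, if_neg hneg, show ("0" : String).toList = ['0'] from by decide]
      simp [pvChC]

theorem pv_main (value : Int) : numberToWhitespace value = numberToWhitespace_alt value := by
  rw [← String.toList_inj]
  unfold numberToWhitespace numberToWhitespace_alt
  simp only [PySem.Str.toList_replace, String.toList_ofList]
  rw [pv_chars_eq]

-- ===== VERDICT (by name: the statement is the Claim_ definition above) =====
theorem numberToWhitespace_spec : Claim_equal_numberToWhitespace := by
  intro value _
  unfold Spec_numberToWhitespace
  exact pv_main value
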